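-- pv_equiv track=rewrite | github.com/igorsimko/DP-test-model | sentence_similarity.py | parse_text_keywords
-- ===== SOURCE A (Python) =====
-- def parse_text_keywords(text_phrases, keywords):
--     ret_val = []
--     for phrase in text_phrases:
--         for word in keywords:
--             if word in phrase:
--                 ret_val.append(phrase)
--                 break
--
--     return ret_val
-- ===== SOURCE B (Python) =====
-- def parse_text_keywords(text_phrases, keywords):
--     # Different algorithm: instead of scanning the keyword list per phrase,
--     # build a hash set of keywords and the (sorted, distinct) keyword lengths
--     # once, then for each phrase test each slice of a keyword length for set
--     # membership -- the inner scan over keywords disappears.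
--     kw_set = set(keywords)
--     lens = sorted(set(len(w) for w in keywords))
--     ret_val = []
--     for phrase in text_phrases:
--         n = len(phrase)
--         if any(i + L <= n and phrase[i:i + L] in kw_set
--                for i in range(n + 1) for L in lens):
--             ret_val.append(phrase)
--     return ret_val
-- ===== Notes on version B (the rewrite author's own statement) =====
-- stated objective: faster
-- what changed: Replaced the per-phrase scan over the keyword list (a substring search for each keyword) by a one-time hash set of keywords plus sorted distinct keyword lengths, testing each phrase slice of a keyword length for set membership.
import Mathlib
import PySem

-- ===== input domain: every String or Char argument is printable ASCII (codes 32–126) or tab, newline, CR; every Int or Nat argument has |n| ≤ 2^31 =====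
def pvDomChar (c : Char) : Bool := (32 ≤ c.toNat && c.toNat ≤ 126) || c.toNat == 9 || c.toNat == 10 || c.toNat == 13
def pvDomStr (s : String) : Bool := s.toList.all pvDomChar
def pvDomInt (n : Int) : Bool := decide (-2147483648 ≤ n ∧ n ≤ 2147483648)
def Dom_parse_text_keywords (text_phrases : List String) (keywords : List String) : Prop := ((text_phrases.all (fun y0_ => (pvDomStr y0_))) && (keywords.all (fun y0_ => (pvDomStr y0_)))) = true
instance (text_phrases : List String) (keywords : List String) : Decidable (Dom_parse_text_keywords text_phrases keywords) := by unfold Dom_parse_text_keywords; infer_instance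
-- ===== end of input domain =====

-- B replaces A's per-phrase scan over the keyword list by a keyword hash set
-- plus distinct keyword lengths, testing phrase slices for membership
-- (objective: alternative algorithm, same observable results).


-- ===== PORT A =====
-- inner 'for word in keywords: if word in phrase: append; break' — first hit wins
def pvLoopKw : List String → String → Bool
  | [], _ => false
  | w :: ws, p => if PySem.Str.isIn w p then true else pvLoopKw ws p

def parse_text_keywords (text_phrases : List String) (keywords : List String) : List String :=
  text_phrases.foldl (fun ret_val phrase =>
    if pvLoopKw keywords phrase then ret_val ++ [phrase] else ret_val) []

-- ===== PORT B =====
-- 'any(i + L <= n and phrase[i:i+L] in kw_set for i in range(n+1) for L in lens)'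
def pvHit (kw_set : PySem.Set String) (lens : List Int) (phrase : String) : Bool :=
  let n := PySem.Str.len phrase
  (PySem.List.pyRange 0 (n + 1) 1).any (fun i =>
    lens.any (fun L =>
      decide (i + L ≤ n) && PySem.Set.contains kw_set (PySem.Str.slice phrase (some i) (some (i + L)))))

def parse_text_keywords_alt (text_phrases : List String) (keywords : List String) : List String :=
  let kw_set : PySem.Set String := PySem.Set.ofList keywords
  let lens : List Int :=
    PySem.List.sorted (PySem.Set.ofList (keywords.map (fun w => PySem.Str.len w))) (fun x => x) false
  text_phrases.foldl (fun ret_val phrase =>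
    if pvHit kw_set lens phrase then ret_val ++ [phrase] else ret_val) []

-- ===== PRECONDITION & SPEC =====
def Spec_parse_text_keywords (text_phrases : List String) (keywords : List String) (out : List String) : Prop := out = parse_text_keywords_alt text_phrases keywords
instance (text_phrases : List String) (keywords : List String) (out : List String) : Decidable (Spec_parse_text_keywords text_phrases keywords out) := by unfold Spec_parse_text_keywords; infer_instance

-- ===== CLAIM (what is proved, stated in full; the proofs are below) =====
def Claim_equal_parse_text_keywords : Prop := ∀ (text_phrases : List String) (keywords : List String), Dom_parse_text_keywords text_phrases keywords → Spec_parse_text_keywords text_phrases keywords (parse_text_keywords text_phrases keywords)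

-- ===== LEMMAS AND PROOFS =====

-- A's inner break-loop is "some keyword is an infix of the phrase"
theorem pvLoopKw_iff (kws : List String) (p : String) :
    pvLoopKw kws p = true ↔ ∃ w ∈ kws, w.toList <:+: p.toList := by
  induction kws with
  | nil => simp [pvLoopKw]
  | cons w ws ih =>
    have hw : PySem.Str.isIn w p = true ↔ w.toList <:+: p.toList := by
      rw [PySem.Str.isIn_eq, PySem.Chars.isIn_iff_infix]
    simp only [pvLoopKw, List.mem_cons]
    by_cases hb : PySem.Str.isIn w p = true
    · simp only [if_pos hb, true_iff]
      exact ⟨w, Or.inl rfl, hw.mp hb⟩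
    · rw [if_neg hb, ih]
      constructor
      · rintro ⟨x, hx, hi⟩; exact ⟨x, Or.inr hx, hi⟩
      · rintro ⟨x, (rfl | hx), hi⟩
        · exact absurd (hw.mpr hi) hb
        · exact ⟨x, hx, hi⟩

-- B's per-phrase slice scan is the same condition
theorem pvHit_iff (kws : List String) (p : String) :
    pvHit (PySem.Set.ofList kws)
      (PySem.List.sorted (PySem.Set.ofList (kws.map (fun w => PySem.Str.len w))) (fun x => x) false)
      p = true ↔ ∃ w ∈ kws, w.toList <:+: p.toList := by
  simp only [pvHit, List.any_eq_true, Bool.and_eq_true, decide_eq_true_eq,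
    PySem.List.mem_pyRange_one, PySem.List.mem_sorted, PySem.Set.mem_ofList,
    List.mem_map, PySem.Set.contains_iff, PySem.Str.len_eq, PySem.Str.slice,
    PySem.Chars.slice_eq_listSlice]
  constructor
  · rintro ⟨i, ⟨hi0, hi1⟩, L, ⟨w0, hw0, rfl⟩, hle, hmem⟩
    refine ⟨_, hmem, ?_⟩
    have hia : i = ((i.toNat : Nat) : Int) := by omega
    rw [hia, PySem.List.slice_natCast_add]
    simp only [String.toList_ofList]
    exact ((List.take_prefix _ _).isInfix).trans (List.drop_suffix _ _).isInfix
  · rintro ⟨w, hw, s, t, hst⟩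
    refine ⟨(s.length : Int), ⟨by positivity, ?_⟩, (w.toList.length : Int),
      ⟨w, hw, (PySem.Str.len_eq w).symm⟩, ?_, ?_⟩
    · have : p.toList.length = s.length + w.toList.length + t.length := by
        rw [← hst]; simp; omega
      omega
    · have : p.toList.length = s.length + w.toList.length + t.length := by
        rw [← hst]; simp; omega
      omega
    · rw [PySem.List.slice_natCast_add, ← hst, List.append_assoc, List.drop_left,
        List.take_left]
      simpa using hw

theorem hit_eq_loop (kws : List String) (p : String) :
    pvHit (PySem.Set.ofList kws)
      (PySem.List.sorted (PySem.Set.ofList (kws.map (fun w => PySem.Str.len w))) (fun x => x) false)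
      p = pvLoopKw kws p := by
  by_cases h : pvLoopKw kws p = true
  · rw [h, (pvHit_iff kws p).mpr ((pvLoopKw_iff kws p).mp h)]
  · rw [Bool.not_eq_true] at h
    rw [h, ← Bool.not_eq_true]
    intro hh
    exact absurd ((pvLoopKw_iff kws p).mpr ((pvHit_iff kws p).mp hh)) (by simp [h])

-- ===== VERDICT (by name: the statement is the Claim_ definition above) =====
theorem parse_text_keywords_spec : Claim_equal_parse_text_keywords := by
  intro tp kws _
  unfold Spec_parse_text_keywords parse_text_keywords parse_text_keywords_alt
  simp only
  congr 1
  funext acc p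
  rw [hit_eq_loop]
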